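-- pv_equiv track=rewrite | github.com/betterzian/PrivacyGuard | privacyguard/infrastructure/pii/detector/preprocess.py | _strip_edge_noise
-- ===== SOURCE A (Python) =====
-- def _strip_edge_noise(chars: list[str], raw_indices: list[int | None]) -> tuple[list[str], list[int | None]]:
--     start = 0
--     end = len(chars)
--     while start < end and _should_strip_edge_char(chars[start]):
--         start += 1
--     while end > start and _should_strip_edge_char(chars[end - 1]):
--         end -= 1
--     return (chars[start:end], raw_indices[start:end])
--
-- def _should_strip_edge_char(char: str) -> bool:
--     """仅去掉块首尾空格；中间噪声字符仍由 ``_normalize_intermediate_char`` 等处理，不因本函数剥边。"""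
--     return char == " "
-- ===== SOURCE B (Python) =====
-- def _strip_edge_noise(chars: list[str], raw_indices: list[int | None]) -> tuple[list[str], list[int | None]]:
--     positions = [i for i, c in enumerate(chars) if c != " "]
--     if not positions:
--         return ([], [])
--     start = positions[0]
--     end = positions[-1] + 1
--     return (chars[start:end], raw_indices[start:end])
-- ===== Notes on version B (the rewrite author's own statement) =====
-- stated objective: alternative
-- what changed: Replaced the two inward edge-walking while-loops over mutable start/end cursors by a single forward scan that collects all non-space positions and slices from the first to one past the last.
import Mathlib
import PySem

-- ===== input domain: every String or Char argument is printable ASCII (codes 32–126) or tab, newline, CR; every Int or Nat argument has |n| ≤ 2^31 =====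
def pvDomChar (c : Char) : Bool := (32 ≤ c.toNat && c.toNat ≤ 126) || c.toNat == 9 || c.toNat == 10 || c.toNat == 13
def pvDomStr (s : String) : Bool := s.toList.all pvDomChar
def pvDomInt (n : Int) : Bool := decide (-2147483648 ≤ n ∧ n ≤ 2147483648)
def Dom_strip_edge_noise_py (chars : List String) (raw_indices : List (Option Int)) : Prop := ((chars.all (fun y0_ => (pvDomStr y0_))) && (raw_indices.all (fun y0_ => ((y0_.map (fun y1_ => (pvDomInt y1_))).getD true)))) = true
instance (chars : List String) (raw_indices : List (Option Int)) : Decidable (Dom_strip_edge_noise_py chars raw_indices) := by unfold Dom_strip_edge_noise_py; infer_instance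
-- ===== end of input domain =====

-- B replaces A's two inward edge-walking while-loops by a single forward scan collecting
-- the non-space positions and slicing from the first to one past the last (alternative decomposition).

-- ===== PORT A =====
-- _should_strip_edge_char
def pvShouldStrip (c : String) : Bool := c == " "

-- first while loop: advance start while start < end and chars[start] is a space
def pvFwd (chars : List String) (s e : Nat) : Nat :=
  if h : s < e ∧ pvShouldStrip (chars.getD s " ") then pvFwd chars (s + 1) e else s
termination_by e - s
decreasing_by omega

-- second while loop: retreat end while end > start and chars[end-1] is a space
def pvBwd (chars : List String) (s e : Nat) : Nat :=
  if h : s < e ∧ pvShouldStrip (chars.getD (e - 1) " ") then pvBwd chars s (e - 1) else e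
termination_by e - s
decreasing_by omega

def strip_edge_noise_py (chars : List String) (raw_indices : List (Option Int)) : List String × List (Option Int) :=
  (PySem.List.slice chars (some ((pvFwd chars 0 chars.length : Nat) : Int))
     (some ((pvBwd chars (pvFwd chars 0 chars.length) chars.length : Nat) : Int)),
   PySem.List.slice raw_indices (some ((pvFwd chars 0 chars.length : Nat) : Int))
     (some ((pvBwd chars (pvFwd chars 0 chars.length) chars.length : Nat) : Int)))

-- ===== PORT B =====
-- positions = [i for i, c in enumerate(chars) if c != " "]
def pvPositions (chars : List String) : List Int :=
  ((PySem.List.enumerate chars 0).filter (fun p => p.2 != " ")).map Prod.fst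

def strip_edge_noise_py_alt (chars : List String) (raw_indices : List (Option Int)) : List String × List (Option Int) :=
  match h : pvPositions chars with
  | [] => ([], [])
  | p0 :: rest =>
    let e := (p0 :: rest).getLast (by simp) + 1
    (PySem.List.slice chars (some p0) (some e),
     PySem.List.slice raw_indices (some p0) (some e))

-- ===== PRECONDITION & SPEC =====
def Spec_strip_edge_noise_py (chars : List String) (raw_indices : List (Option Int)) (out : List String × List (Option Int)) : Prop := out = strip_edge_noise_py_alt chars raw_indices
instance (chars : List String) (raw_indices : List (Option Int)) (out : List String × List (Option Int)) : Decidable (Spec_strip_edge_noise_py chars raw_indices out) := by unfold Spec_strip_edge_noise_py; infer_instance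

-- ===== CLAIM (what is proved, stated in full; the proofs are below) =====
def Claim_equal_strip_edge_noise_py : Prop := ∀ (chars : List String) (raw_indices : List (Option Int)), Dom_strip_edge_noise_py chars raw_indices → Spec_strip_edge_noise_py chars raw_indices (strip_edge_noise_py chars raw_indices)

-- ===== LEMMAS AND PROOFS =====

theorem pvFwd_spec (chars : List String) (s e : Nat) : s ≤ e →
    s ≤ pvFwd chars s e ∧ pvFwd chars s e ≤ e ∧
    (∀ i, s ≤ i → i < pvFwd chars s e → chars.getD i " " = " ") ∧
    (pvFwd chars s e < e → chars.getD (pvFwd chars s e) " " ≠ " ") := by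
  fun_induction pvFwd chars s e with
  | case1 s h ih =>
    intro _
    obtain ⟨h1, h2⟩ := h
    obtain ⟨i1, i2, i3, i4⟩ := ih (by omega)
    refine ⟨by omega, i2, ?_, i4⟩
    intro i his hi
    rcases Nat.eq_or_lt_of_le his with rfl | hlt
    · simpa [pvShouldStrip] using h2
    · exact i3 i (by omega) hi
  | case2 s h =>
    intro hse
    refine ⟨le_refl _, hse, by omega, ?_⟩
    intro hlt hc
    exact h ⟨hlt, by simp only [pvShouldStrip, beq_iff_eq]; exact hc⟩

theorem pvBwd_spec (chars : List String) (s e : Nat) : s ≤ e →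
    s ≤ pvBwd chars s e ∧ pvBwd chars s e ≤ e ∧
    (∀ i, pvBwd chars s e ≤ i → i < e → chars.getD i " " = " ") ∧
    (s < pvBwd chars s e → chars.getD (pvBwd chars s e - 1) " " ≠ " ") := by
  fun_induction pvBwd chars s e with
  | case1 e h ih =>
    intro _
    obtain ⟨h1, h2⟩ := h
    obtain ⟨i1, i2, i3, i4⟩ := ih (by omega)
    refine ⟨i1, by omega, ?_, i4⟩
    intro i hri hi
    rcases Nat.lt_or_ge i (e - 1) with hlt | hge
    · exact i3 i hri hlt
    · have : i = e - 1 := by omega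
      subst this
      simpa [pvShouldStrip] using h2
  | case2 e h =>
    intro hse
    refine ⟨hse, le_refl _, by omega, ?_⟩
    intro hlt hc
    exact h ⟨hlt, by simp only [pvShouldStrip, beq_iff_eq]; exact hc⟩

theorem mem_pvPositions (chars : List String) (x : Int) :
    x ∈ pvPositions chars ↔ ∃ (k : Nat) (h : k < chars.length), x = (k : Int) ∧ chars[k] ≠ " " := by
  unfold pvPositions
  simp only [List.mem_map, List.mem_filter]
  constructor
  · rintro ⟨p, ⟨hp, hne⟩, rfl⟩
    obtain ⟨k, hk, rfl⟩ := (PySem.List.mem_enumerate_iff _ _ _).1 hp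
    exact ⟨k, hk, by simp, by simpa using hne⟩
  · rintro ⟨k, hk, rfl, hne⟩
    refine ⟨((k : Int), chars[k]), ⟨?_, by simpa using hne⟩, rfl⟩
    exact (PySem.List.mem_enumerate_iff _ _ _).2 ⟨k, hk, by simp⟩

theorem pvPositions_pairwise (chars : List String) : (pvPositions chars).Pairwise (· < ·) := by
  unfold pvPositions
  rw [List.pairwise_map]
  exact (PySem.List.pairwise_lt_enumerate chars 0).filter _

theorem pairwise_le_getLast? : ∀ {l : List Int}, l.Pairwise (· < ·) →
    ∀ {x y : Int}, x ∈ l → l.getLast? = some y → x ≤ y := by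
  intro l
  induction l with
  | nil => intro _ x y hx; simp at hx
  | cons a t ih =>
    intro h x y hx hy
    rcases List.pairwise_cons.1 h with ⟨ha, ht⟩
    cases t with
    | nil =>
      simp at hx hy
      omega
    | cons b u =>
      rw [List.getLast?_cons_cons] at hy
      rcases List.mem_cons.1 hx with rfl | hx'
      · have hym : y ∈ b :: u := by
          have := List.mem_getLast?_eq_getLast (l := b :: u) hy
          exact this.choose_spec ▸ List.getLast_mem _
        exact le_of_lt (ha y hym)
      · exact ih ht hx' hy

theorem pairwise_head_le {a : Int} {t : List Int} (h : (a :: t).Pairwise (· < ·)) {x : Int}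
    (hx : x ∈ a :: t) : a ≤ x := by
  rcases List.mem_cons.1 hx with rfl | hx'
  · exact le_refl _
  · exact le_of_lt ((List.pairwise_cons.1 h).1 x hx')

theorem getD_eq_getElem' (chars : List String) (k : Nat) (h : k < chars.length) :
    chars.getD k " " = chars[k] := List.getD_eq_getElem chars " " h

theorem strip_edge_noise_py_eq (chars : List String) (raw_indices : List (Option Int)) :
    strip_edge_noise_py chars raw_indices = strip_edge_noise_py_alt chars raw_indices := by
  obtain ⟨f1, f2, f3, f4⟩ := pvFwd_spec chars 0 chars.length (Nat.zero_le _)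
  obtain ⟨b1, b2, b3, b4⟩ := pvBwd_spec chars (pvFwd chars 0 chars.length) chars.length f2
  have hpw := pvPositions_pairwise chars
  unfold strip_edge_noise_py strip_edge_noise_py_alt
  cases hpos : pvPositions chars with
  | nil =>
    -- all characters are spaces: both sides are ([], [])
    have hall : ∀ k : Nat, (h : k < chars.length) → chars[k] = " " := by
      intro k hk
      by_contra hne
      have : (k : Int) ∈ pvPositions chars := (mem_pvPositions chars _).2 ⟨k, hk, rfl, hne⟩
      simp [hpos] at this
    have hse : pvFwd chars 0 chars.length = chars.length := by
      by_contra hne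
      have hlt : pvFwd chars 0 chars.length < chars.length := lt_of_le_of_ne f2 hne
      exact f4 hlt (by rw [getD_eq_getElem' chars _ hlt]; exact hall _ hlt)
    have hee : pvBwd chars (pvFwd chars 0 chars.length) chars.length = chars.length := by omega
    rw [hee, hse]
    simp [PySem.List.slice_natCast]
  | cons p0 rest =>
    have hmem0 : p0 ∈ pvPositions chars := by rw [hpos]; exact List.mem_cons_self
    obtain ⟨k0, hk0, hp0, hc0⟩ := (mem_pvPositions chars p0).1 hmem0
    have hql : (pvPositions chars).getLast? = some ((p0 :: rest).getLast (by simp)) := by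
      rw [hpos]
      exact List.getLast?_eq_some_getLast (by simp)
    have hlast_mem : (p0 :: rest).getLast (by simp) ∈ pvPositions chars := by
      rw [hpos]; exact List.getLast_mem _
    obtain ⟨kl, hkl, hpl, hcl⟩ := (mem_pvPositions chars _).1 hlast_mem
    have hpw' : (p0 :: rest).Pairwise (· < ·) := hpos ▸ hpw
    have hmin : ∀ x ∈ pvPositions chars, p0 ≤ x := by
      intro x hx; exact pairwise_head_le hpw' (hpos ▸ hx)
    have hmax : ∀ x ∈ pvPositions chars, x ≤ (kl : Int) := by
      intro x hx
      exact hpl ▸ pairwise_le_getLast? hpw hx hql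
    -- start cursor stops exactly at the first non-space index k0
    have hsk : pvFwd chars 0 chars.length = k0 := by
      have hsle : pvFwd chars 0 chars.length ≤ k0 := by
        by_contra hgt
        exact hc0 ((getD_eq_getElem' chars k0 hk0) ▸ f3 k0 (Nat.zero_le _) (by omega))
      have hslt : pvFwd chars 0 chars.length < chars.length := by omega
      have hsmem : ((pvFwd chars 0 chars.length : Nat) : Int) ∈ pvPositions chars :=
        (mem_pvPositions chars _).2 ⟨_, hslt, rfl, by
          rw [← getD_eq_getElem' chars _ hslt]; exact f4 hslt⟩
      have := hmin _ hsmem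
      have hp0' := hp0
      omega
    -- end cursor stops exactly one past the last non-space index kl
    have hek : pvBwd chars (pvFwd chars 0 chars.length) chars.length = kl + 1 := by
      have hkle : kl + 1 ≤ pvBwd chars (pvFwd chars 0 chars.length) chars.length := by
        by_contra hgt
        exact hcl ((getD_eq_getElem' chars kl hkl) ▸ b3 kl (by omega) hkl)
      have hsltkl : pvFwd chars 0 chars.length ≤ kl := by
        have := hmax _ hmem0
        omega
      have hslt : pvFwd chars 0 chars.length < pvBwd chars (pvFwd chars 0 chars.length) chars.length := by omega
      have hem : pvBwd chars (pvFwd chars 0 chars.length) chars.length - 1 < chars.length := by omega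
      have hemem : ((pvBwd chars (pvFwd chars 0 chars.length) chars.length - 1 : Nat) : Int) ∈ pvPositions chars :=
        (mem_pvPositions chars _).2 ⟨_, hem, rfl, by
          rw [← getD_eq_getElem' chars _ hem]; exact b4 hslt⟩
      have := hmax _ hemem
      omega
    rw [hek, hsk]
    have hgl : ∀ (hne : (p0 :: rest) ≠ []), (p0 :: rest).getLast hne = (kl : Int) := fun _ => hpl
    rw [hp0] at hgl
    simp only [hgl, hp0, Nat.cast_add, Nat.cast_one]

-- ===== VERDICT (by name: the statement is the Claim_ definition above) =====
theorem strip_edge_noise_py_spec : Claim_equal_strip_edge_noise_py := by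
  intro chars raw_indices _
  exact strip_edge_noise_py_eq chars raw_indices
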